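-- pv_equiv track=rewrite | github.com/Byxis/IG3-Opti | TP2/TP2.py | jPivot
-- ===== SOURCE A (Python) =====
-- def jPivot(M):
--     j = 0
--     isValid = False
--     for jj in range(len(M)-1):
--         if M[-1][jj] > 0:
--             isValid = True
--             if M[-1][jj] > M[-1][j]:
--                 j = jj
--
--     if isValid:
--         return j
--     return -1
-- ===== SOURCE B (Python) =====
-- def jPivot(M):
--     # aggregate pass (max of candidate cells) + locate pass (first index of that max)
--     row = M[-1] if M else []
--     cand = row[:len(M) - 1]
--     if not cand:
--         return -1
--     m = max(cand)
--     return cand.index(m) if m > 0 else -1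
-- ===== Notes on version B (the rewrite author's own statement) =====
-- stated objective: idiomatic
-- what changed: Replaced A's single integrated argmax loop with flag state by an aggregate pass (max of the candidate cells) followed by a separate locate pass (first index equal to that max); A's IndexError when the last row is shorter than len(M)-1 is excluded by Pre_.
import Mathlib
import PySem

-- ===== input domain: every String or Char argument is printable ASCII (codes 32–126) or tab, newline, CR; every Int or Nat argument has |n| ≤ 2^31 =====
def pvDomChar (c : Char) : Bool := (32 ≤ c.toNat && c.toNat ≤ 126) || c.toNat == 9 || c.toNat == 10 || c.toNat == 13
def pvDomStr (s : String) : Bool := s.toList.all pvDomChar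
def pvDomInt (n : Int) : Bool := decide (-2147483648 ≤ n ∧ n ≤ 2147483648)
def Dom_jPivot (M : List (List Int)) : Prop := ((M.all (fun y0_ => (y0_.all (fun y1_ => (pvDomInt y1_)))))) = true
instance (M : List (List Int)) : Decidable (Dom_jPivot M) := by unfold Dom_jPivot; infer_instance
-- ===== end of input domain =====

-- B replaces A's single argmax-with-flag loop by an aggregate pass (max of the candidate cells) plus a locate pass (first index equal to that max); same cost, plainer structure.

-- ===== PORT A =====
def stepA (row : List Int) (s : Int × Bool) (jj : Int) : Int × Bool :=
  if PySem.List.pyGetD row jj 0 > 0 then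
    if PySem.List.pyGetD row jj 0 > PySem.List.pyGetD row s.1 0 then (jj, true) else (s.1, true)
  else s


def jPivot (M : List (List Int)) : Int :=
  let row := PySem.List.pyGetD M (-1) []
  let s := (PySem.List.pyRange 0 ((M.length : Int) - 1) 1).foldl (stepA row) (0, false)
  if s.2 then s.1 else -1

-- ===== PORT B =====
def jPivot_alt (M : List (List Int)) : Int :=
  let row := (PySem.List.pyGet? M (-1)).getD []
  let cand := PySem.List.slice row none (some ((M.length : Int) - 1))
  if cand = [] then -1
  else
    let m := (PySem.List.max? cand (fun x => x)).getD 0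
    if m > 0 then (((PySem.List.index? cand m).getD 0 : Nat) : Int) else -1

-- ===== PRECONDITION & SPEC =====
-- Pre_ excludes exactly the inputs on which A raises IndexError: a nonempty M whose last row is shorter than len(M)-1.
def Pre_jPivot (M : List (List Int)) : Prop := M.length - 1 ≤ (M.getLastD []).length
instance (M : List (List Int)) : Decidable (Pre_jPivot M) := by unfold Pre_jPivot; infer_instance
def pvWitness_jPivot : List (List Int) := [[3, -1, 2], [0, 5, 1], [2, 7, 2]]
def Spec_jPivot (M : List (List Int)) (out : Int) : Prop := out = jPivot_alt M
instance (M : List (List Int)) (out : Int) : Decidable (Spec_jPivot M out) := by unfold Spec_jPivot; infer_instance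

-- ===== CLAIM (what is proved, stated in full; the proofs are below) =====
def Claim_equal_jPivot : Prop := ∀ (M : List (List Int)), Dom_jPivot M → Pre_jPivot M → Spec_jPivot M (jPivot M)

-- ===== LEMMAS AND PROOFS =====

def pmax (c : List Int) : Int := match c with | [] => 0 | x :: t => t.foldl max x

theorem pmax_mem (c : List Int) (h : c ≠ []) : pmax c ∈ c := by
  match c with
  | x :: t =>
    rcases PySem.List.foldl_max_mem t x with h1 | h1
    · simp [pmax, h1]
    · simp [pmax, h1]

theorem le_pmax (c : List Int) : ∀ y ∈ c, y ≤ pmax c := by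
  intro y hy
  match c with
  | x :: t =>
    rcases List.mem_cons.mp hy with rfl | hy
    · exact (PySem.List.le_foldl_max t y).1
    · exact (PySem.List.le_foldl_max t x).2 y hy

theorem pmax_append_singleton (c : List Int) (h : c ≠ []) (a : Int) :
    pmax (c ++ [a]) = max (pmax c) a := by
  match c with
  | x :: t => simp [pmax, List.foldl_append]
theorem loopA_spec (row : List Int) (n : Nat) (h : n ≤ row.length) :
    (PySem.List.pyRange 0 (n : Int) 1).foldl (stepA row) ((0 : Int), false)
      = if (row.take n).any (fun v => decide (0 < v))
        then ((((PySem.List.index? (row.take n) (pmax (row.take n))).getD 0 : Nat) : Int), true)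
        else (0, false) := by
  induction n with
  | zero => simp [PySem.List.pyRange_one_eq_nil]
  | succ n ih =>
    have hn : n ≤ row.length := Nat.le_of_succ_le h
    have hlt : n < row.length := h
    have hrange : PySem.List.pyRange 0 ((n : Nat) + 1 : Nat) 1
        = PySem.List.pyRange 0 (n : Int) 1 ++ [(n : Int)] := by
      push_cast
      exact PySem.List.pyRange_one_succ_right (by omega : (0:Int) ≤ (n:Int))
    have htake : row.take (n + 1) = row.take n ++ [row[n]] := by
      rw [List.take_add_one, List.getElem?_eq_getElem hlt]; rfl
    have hclen : (row.take n).length = n := by rw [List.length_take]; omega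
    have hgetn : row[n]?.getD 0 = row[n] := by
      rw [List.getElem?_eq_getElem hlt, Option.getD_some]
    rw [hrange, List.foldl_append, ih hn]
    by_cases hb : ((row.take n).any (fun v => decide (0 < v))) = true
    · -- some positive already in the processed prefix
      have hcne : row.take n ≠ [] := by
        intro h0; rw [h0] at hb; simp at hb
      obtain ⟨v, hvc, hv⟩ := List.any_eq_true.mp hb
      replace hv : (0:Int) < v := of_decide_eq_true hv
      have hvplt : (0:Int) < pmax (row.take n) := lt_of_lt_of_le hv (le_pmax _ v hvc)
      have hmem : pmax (row.take n) ∈ row.take n := pmax_mem _ hcne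
      obtain ⟨k, hk⟩ : ∃ k, PySem.List.index? (row.take n) (pmax (row.take n)) = some k :=
        Option.isSome_iff_exists.mp ((PySem.List.index?_isSome_iff _ _).mpr hmem)
      obtain ⟨hklt, hck, -⟩ := PySem.List.getElem_of_index?_eq_some hk
      have hkn : k < n := by omega
      rw [List.getElem_take] at hck
      have hgetk : row[k]?.getD 0 = pmax (row.take n) := by
        rw [List.getElem?_eq_getElem (show k < row.length by omega), Option.getD_some]
        exact hck
      rw [PySem.List.index?_eq_idxOf?] at hk
      have hex : ∃ x ∈ row.take (n + 1), (0:Int) < x :=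
        ⟨v, by rw [htake]; exact List.mem_append_left _ hvc, hv⟩
      have hex0 : ∃ x ∈ row.take n, (0:Int) < x := ⟨v, hvc, hv⟩
      by_cases hpos : (0:Int) < row[n]
      · by_cases hgt : pmax (row.take n) < row[n]
        · -- strictly larger: new argmax at index n
          have hnotmem : row[n] ∉ row.take n := fun hx => absurd (le_pmax _ _ hx) (not_le.mpr hgt)
          have hidx : PySem.List.index? (row.take n ++ [row[n]]) row[n] = some (row.take n).length :=
            PySem.List.index?_append_singleton_self _ _ hnotmem
          rw [PySem.List.index?_eq_idxOf?] at hidx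
          have hidx' : List.idxOf? row[n] (row.take (n + 1)) = some n := by
            rw [htake, hidx, hclen]
          have hpm' : pmax (row.take (n + 1)) = row[n] := by
            rw [htake, pmax_append_singleton _ hcne]; exact max_eq_right (le_of_lt hgt)
          simp [stepA, hk, hgetn, hgetk, hpos, hgt, hex, hpm', hidx', hex0]
        · have hle : row[n] ≤ pmax (row.take n) := not_lt.mp hgt
          have hpm' : pmax (row.take (n + 1)) = pmax (row.take n) := by
            rw [htake, pmax_append_singleton _ hcne]; exact max_eq_left hle
          have hidx : PySem.List.index? (row.take n ++ [row[n]]) (pmax (row.take n))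
              = PySem.List.index? (row.take n) (pmax (row.take n)) :=
            PySem.List.index?_append_of_mem [row[n]] hmem
          rw [PySem.List.index?_eq_idxOf?, PySem.List.index?_eq_idxOf?] at hidx
          have hidx' : List.idxOf? (pmax (row.take n)) (row.take (n + 1)) = some k := by
            rw [htake, hidx, hk]
          simp [stepA, hk, hgetn, hgetk, hpos, hgt, hex, hpm', hidx', hex0]
      · -- current cell not positive: state and max unchanged
        have hle : row[n] ≤ pmax (row.take n) := le_trans (not_lt.mp hpos) (le_of_lt hvplt)
        have hpm' : pmax (row.take (n + 1)) = pmax (row.take n) := by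
          rw [htake, pmax_append_singleton _ hcne]; exact max_eq_left hle
        have hidx : PySem.List.index? (row.take n ++ [row[n]]) (pmax (row.take n))
            = PySem.List.index? (row.take n) (pmax (row.take n)) :=
          PySem.List.index?_append_of_mem [row[n]] hmem
        rw [PySem.List.index?_eq_idxOf?, PySem.List.index?_eq_idxOf?] at hidx
        have hidx' : List.idxOf? (pmax (row.take n)) (row.take (n + 1)) = some k := by
          rw [htake, hidx, hk]
        simp [stepA, hk, hgetn, hpos, hex, hpm', hidx', hex0]
    · -- no positive cell in the processed prefix
      have hball : ∀ v ∈ row.take n, ¬ (0:Int) < v := by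
        intro v hvc hv
        exact hb (List.any_eq_true.mpr ⟨v, hvc, decide_eq_true hv⟩)
      have hnex0 : ¬ ∃ x ∈ row.take n, (0:Int) < x := by
        rintro ⟨x, hx, hx0⟩; exact hball x hx hx0
      by_cases hpos : (0:Int) < row[n]
      · have hex : ∃ x ∈ row.take (n + 1), (0:Int) < x :=
          ⟨row[n], by rw [htake]; exact List.mem_append_right _ (List.mem_singleton.mpr rfl), hpos⟩
        rcases Nat.eq_zero_or_pos n with rfl | hn0
        · -- empty prefix: the flag turns on, j stays 0
          have hidx0 : PySem.List.index? ([row[0]] : List Int) row[0] = some 0 :=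
            PySem.List.index?_cons_self _ _
          rw [PySem.List.index?_eq_idxOf?] at hidx0
          have hidx' : List.idxOf? row[0] (row.take (0 + 1)) = some 0 := by
            rw [htake]; simp only [List.take_zero, List.nil_append]; exact hidx0
          have hpm' : pmax (row.take (0 + 1)) = row[0] := by
            rw [htake]; simp [pmax]
          simp [stepA, hgetn, hpos, hex, hpm', hidx', PySem.List.pyGetD_zero,
            List.getD_eq_getElem?_getD]
        · -- nonempty all-nonpositive prefix, positive cell: jump to index n
          have hcne : row.take n ≠ [] := by
            rw [← List.length_pos_iff, List.length_take]; omega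
          have hpmle : pmax (row.take n) ≤ 0 := not_lt.mp (hball _ (pmax_mem _ hcne))
          have h0r : (0:Nat) < row.length := by omega
          have h0c : (0:Nat) < (row.take n).length := by rw [List.length_take]; omega
          have hc0mem : row[0] ∈ row.take n := by
            have h2 := List.getElem_mem h0c
            rwa [List.getElem_take] at h2
          have hget0 : row[0]?.getD 0 = row[0] := by
            rw [List.getElem?_eq_getElem h0r, Option.getD_some]
          have hlt0 : row[0] < row[n] := lt_of_le_of_lt (not_lt.mp (hball _ hc0mem)) hpos
          have hnotmem : row[n] ∉ row.take n := fun hx => absurd hpos (hball _ hx)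
          have hidx : PySem.List.index? (row.take n ++ [row[n]]) row[n] = some (row.take n).length :=
            PySem.List.index?_append_singleton_self _ _ hnotmem
          rw [PySem.List.index?_eq_idxOf?] at hidx
          have hidx' : List.idxOf? row[n] (row.take (n + 1)) = some n := by
            rw [htake, hidx, hclen]
          have hpm' : pmax (row.take (n + 1)) = row[n] := by
            rw [htake, pmax_append_singleton _ hcne]
            exact max_eq_right (le_trans hpmle (le_of_lt hpos))
          simp [stepA, hb, hgetn, hget0, hpos, hlt0, hex, hpm', hidx',
            PySem.List.pyGetD_zero, List.getD_eq_getElem?_getD]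
      · -- nothing changes
        have hnex : ¬ ∃ x ∈ row.take (n + 1), (0:Int) < x := by
          rintro ⟨x, hx, hx0⟩
          rw [htake] at hx
          rcases List.mem_append.mp hx with hx | hx
          · exact hball x hx hx0
          · simp at hx; subst hx; exact hpos hx0
        simp [stepA, hb, hgetn, hpos, hnex]

-- Python max(c) of a nonempty list c
theorem max?_eq_pmax (c : List Int) (h : c ≠ []) :
    PySem.List.max? c (fun y => y) = some (pmax c) := by
  match c with
  | x :: t => rw [PySem.List.max?_id_cons]; rfl

theorem jPivot_eq_alt (M : List (List Int)) (hpre : Pre_jPivot M) :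
    jPivot M = jPivot_alt M := by
  rcases eq_or_ne M [] with rfl | hM
  · decide
  · have hlen1 : 1 ≤ M.length := List.length_pos_iff.mpr hM
    have hlast : PySem.List.pyGetD M (-1) [] = M.getLast hM := PySem.List.pyGetD_neg_one M [] hM
    have hget : (PySem.List.pyGet? M (-1)).getD [] = M.getLast hM := by
      rw [PySem.List.pyGet?_neg_one, List.getLast?_eq_some_getLast hM, Option.getD_some]
    have hcastlen : ((M.length : Int) - 1) = ((M.length - 1 : Nat) : Int) := by
      push_cast [hlen1]; omega
    have hcand : PySem.List.slice (M.getLast hM) none (some ((M.length - 1 : Nat) : Int))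
        = (M.getLast hM).take (M.length - 1) := by
      rw [PySem.List.slice_to_natCast]
    have hpre' : M.length - 1 ≤ (M.getLast hM).length := by
      unfold Pre_jPivot at hpre
      rwa [List.getLastD_eq_getLast?, List.getLast?_eq_some_getLast hM, Option.getD_some] at hpre
    unfold jPivot jPivot_alt
    simp only [hlast, hget, hcastlen, hcand]
    rw [loopA_spec (M.getLast hM) (M.length - 1) hpre']
    by_cases hb : (((M.getLast hM).take (M.length - 1)).any (fun v => decide (0 < v))) = true
    · -- a positive candidate exists: both return the first argmax
      rw [if_pos hb]
      obtain ⟨v, hvc, hv⟩ := List.any_eq_true.mp hb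
      replace hv : (0:Int) < v := of_decide_eq_true hv
      have hcne : (M.getLast hM).take (M.length - 1) ≠ [] := by
        intro h0; rw [h0] at hvc; simp at hvc
      have hpos : (0:Int) < pmax ((M.getLast hM).take (M.length - 1)) :=
        lt_of_lt_of_le hv (le_pmax _ v hvc)
      simp [hcne, max?_eq_pmax _ hcne, hpos]
    · -- no positive candidate: both return -1
      rw [if_neg hb]
      rcases eq_or_ne ((M.getLast hM).take (M.length - 1)) [] with hnil | hcne
      · simp [hnil]
      · have hple : pmax ((M.getLast hM).take (M.length - 1)) ≤ 0 := by
          by_contra hgt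
          exact hb (List.any_eq_true.mpr
            ⟨_, pmax_mem _ hcne, decide_eq_true (not_le.mp hgt)⟩)
        simp [hcne, max?_eq_pmax _ hcne, not_lt.mpr hple]

-- ===== VERDICT (by name: the statement is the Claim_ definition above) =====
theorem jPivot_spec : Claim_equal_jPivot := by
  intro M _ hpre
  unfold Spec_jPivot
  exact jPivot_eq_alt M hpre
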